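-- pv_equiv track=rewrite | github.com/onlyfeng/engram | scripts/ops/mcp_doctor.py | _build_preflight_headers
-- ===== SOURCE A (Python) =====
-- from typing import Any, Dict, Optional, Tuple
--
-- def _build_preflight_headers(request_headers: Dict[str, str]) -> Dict[str, str]:
--     header_names = []
--     seen = set()
--     for key in request_headers:
--         name = key.strip()
--         if not name:
--             continue
--         normalized = name.lower()
--         if normalized in seen:
--             continue
--         seen.add(normalized)
--         header_names.append(name)
--     header_names = sorted(header_names, key=str.lower)
--     access_request_headers = ", ".join(header_names)
--     return {
--         "Access-Control-Request-Method": "POST",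
--         "Access-Control-Request-Headers": access_request_headers,
--     }
-- ===== SOURCE B (Python) =====
-- def _build_preflight_headers(request_headers):
--     names = [name for name in (key.strip() for key in request_headers) if name]
--     names = sorted(names, key=str.lower)
--     uniq = []
--     for n in names:
--         if not uniq or uniq[-1].lower() != n.lower():
--             uniq.append(n)
--     return {
--         "Access-Control-Request-Method": "POST",
--         "Access-Control-Request-Headers": ", ".join(uniq),
--     }
-- ===== Notes on version B (the rewrite author's own statement) =====
-- stated objective: alternative
-- what changed: A dedups first-seen header names with a seen-set while iterating, then sorts; B strips/filters, stable-sorts by lowercase, and dedups in one consecutive pass over the sorted list (no auxiliary set), relying on sort stability to keep the first-seen casing.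
import Mathlib
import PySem

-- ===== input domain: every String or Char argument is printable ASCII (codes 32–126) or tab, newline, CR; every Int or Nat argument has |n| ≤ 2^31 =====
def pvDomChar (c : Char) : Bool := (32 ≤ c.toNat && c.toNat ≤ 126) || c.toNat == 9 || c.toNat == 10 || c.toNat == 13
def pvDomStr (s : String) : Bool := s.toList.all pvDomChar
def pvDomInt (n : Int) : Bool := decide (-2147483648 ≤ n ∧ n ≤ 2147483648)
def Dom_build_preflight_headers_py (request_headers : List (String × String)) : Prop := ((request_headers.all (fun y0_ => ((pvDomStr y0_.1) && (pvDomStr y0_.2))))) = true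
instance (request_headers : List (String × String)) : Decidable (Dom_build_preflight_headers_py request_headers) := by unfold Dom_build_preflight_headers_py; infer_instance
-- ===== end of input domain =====

-- B replaces A's seen-set dedup-then-sort with a stable sort followed by one consecutive-duplicate
-- pass (no auxiliary set); same cost, different decomposition ("alternative").

-- ===== PORT A =====
-- A's loop body: strip the key, skip empties, skip names whose lowercase was already seen.
def pvStepA (acc : List String × PySem.Set String) (kv : String × String) : List String × PySem.Set String :=
  let name := PySem.Str.strip kv.1
  if name = "" then acc
  else
    let normalized := PySem.Str.lower name
    if PySem.Set.contains acc.2 normalized then acc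
    else (acc.1 ++ [name], PySem.Set.add acc.2 normalized)

def build_preflight_headers_py (request_headers : List (String × String)) : List (String × String) :=
  let st := request_headers.foldl pvStepA ([], PySem.Set.empty)
  let header_names := PySem.List.sorted st.1 (fun s => (PySem.Str.lower s).toList) false
  [("Access-Control-Request-Method", "POST"),
   ("Access-Control-Request-Headers", PySem.Str.join ", " header_names)]

-- ===== PORT B =====
-- B's first comprehension: stripped, non-empty header names.
def pvNames (request_headers : List (String × String)) : List String :=
  (request_headers.map (fun kv => PySem.Str.strip kv.1)).filter (fun n => n ≠ "")

-- B's loop body: keep a name only when its lowercase differs from the last kept name's lowercase.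
def pvStepB (uniq : List String) (n : String) : List String :=
  match uniq.getLast? with
  | none => uniq ++ [n]
  | some l => if PySem.Str.lower l = PySem.Str.lower n then uniq else uniq ++ [n]

def build_preflight_headers_py_alt (request_headers : List (String × String)) : List (String × String) :=
  let names := pvNames request_headers
  let snames := PySem.List.sorted names (fun s => (PySem.Str.lower s).toList) false
  let uniq := snames.foldl pvStepB []
  [("Access-Control-Request-Method", "POST"),
   ("Access-Control-Request-Headers", PySem.Str.join ", " uniq)]

-- ===== PRECONDITION & SPEC =====
def Spec_build_preflight_headers_py (request_headers : List (String × String)) (out : List (String × String)) : Prop := out = build_preflight_headers_py_alt request_headers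
instance (request_headers : List (String × String)) (out : List (String × String)) : Decidable (Spec_build_preflight_headers_py request_headers out) := by unfold Spec_build_preflight_headers_py; infer_instance

-- ===== CLAIM (what is proved, stated in full; the proofs are below) =====
def Claim_equal_build_preflight_headers_py : Prop := ∀ (request_headers : List (String × String)), Dom_build_preflight_headers_py request_headers → Spec_build_preflight_headers_py request_headers (build_preflight_headers_py request_headers)

-- ===== LEMMAS AND PROOFS =====

-- first-occurrence-per-key dedup with a seen-key accumulator (what A's seen-set loop computes)
def pvDks {α κ : Type} [DecidableEq κ] (key : α → κ) : List κ → List α → List α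
  | _, [] => []
  | seen, x :: xs => if key x ∈ seen then pvDks key seen xs else x :: pvDks key (key x :: seen) xs

-- consecutive dedup with previous kept key p (what B's loop computes)
def pvCd {α κ : Type} [DecidableEq κ] (key : α → κ) (p : κ) : List α → List α
  | [] => []
  | x :: xs => if key x = p then pvCd key p xs else x :: pvCd key (key x) xs

def pvCdedup {α κ : Type} [DecidableEq κ] (key : α → κ) : List α → List α
  | [] => []
  | x :: xs => x :: pvCd key (key x) xs

-- pvDks depends on the seen accumulator only through membership
theorem pv_dks_equiv {α κ : Type} [DecidableEq κ] (key : α → κ) :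
    ∀ (L : List α) (s1 s2 : List κ), (∀ v, v ∈ s1 ↔ v ∈ s2) → pvDks key s1 L = pvDks key s2 L := by
  intro L
  induction L with
  | nil => intro s1 s2 _; rfl
  | cons x xs ih =>
    intro s1 s2 h
    by_cases hx : key x ∈ s1
    · simp [pvDks, hx, (h (key x)).mp hx, ih s1 s2 h]
    · have hx2 : key x ∉ s2 := fun hc => hx ((h (key x)).mpr hc)
      simp only [pvDks, if_neg hx, if_neg hx2]
      exact congrArg _ (ih _ _ (by intro v; simp [h v]))

theorem pv_mem_dks {α κ : Type} [DecidableEq κ] (key : α → κ) :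
    ∀ (L : List α) (seen : List κ) (y : α), y ∈ pvDks key seen L → y ∈ L := by
  intro L
  induction L with
  | nil => intro seen y h; simp [pvDks] at h
  | cons x xs ih =>
    intro seen y h
    by_cases hx : key x ∈ seen
    · simp only [pvDks, if_pos hx] at h
      exact List.mem_cons_of_mem _ (ih _ _ h)
    · simp only [pvDks, if_neg hx, List.mem_cons] at h
      rcases h with rfl | h
      · exact List.mem_cons_self
      · exact List.mem_cons_of_mem _ (ih _ _ h)

theorem pv_key_mem_dks {α κ : Type} [DecidableEq κ] (key : α → κ) :
    ∀ (L : List α) (seen : List κ) (y : α), y ∈ pvDks key seen L → key y ∉ seen := by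
  intro L
  induction L with
  | nil => intro seen y h; simp [pvDks] at h
  | cons x xs ih =>
    intro seen y h
    by_cases hx : key x ∈ seen
    · simp only [pvDks, if_pos hx] at h
      exact ih _ _ h
    · simp only [pvDks, if_neg hx, List.mem_cons] at h
      rcases h with rfl | h
      · exact hx
      · have := ih _ _ h
        intro hc; exact this (List.mem_cons_of_mem _ hc)

-- filtering a whole key class out of the result = adding that key to seen
theorem pv_dks_filter_ne {α κ : Type} [DecidableEq κ] (key : α → κ) (m : κ) :
    ∀ (L : List α) (seen : List κ),
      (pvDks key seen L).filter (fun x => key x ≠ m) = pvDks key (m :: seen) L := by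
  intro L
  induction L with
  | nil => intro seen; rfl
  | cons x xs ih =>
    intro seen
    simp only [ne_eq, decide_not] at ih ⊢
    by_cases hx : key x ∈ seen
    · simp only [pvDks, if_pos hx, if_pos (List.mem_cons_of_mem m hx)]
      exact ih seen
    · by_cases hm : key x = m
      · subst hm
        have hmem : key x ∈ (key x :: seen) := List.mem_cons_self
        simp only [pvDks, if_neg hx, if_pos List.mem_cons_self, List.filter_cons,
          decide_true, Bool.not_true, Bool.false_eq_true, if_false]
        rw [ih]
        exact pv_dks_equiv key xs _ _ (by intro v; simp)
      · have hx' : key x ∉ (m :: seen) := by simp [hx, hm]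
        simp only [pvDks, if_neg hx, if_neg hx', List.filter_cons, hm, decide_false,
          Bool.not_false, if_true]
        rw [ih]
        exact congrArg _ (pv_dks_equiv key xs _ _ (by intro v; simp; tauto))

-- adding a key to seen = filtering its class out of the input
theorem pv_dks_cons_seen {α κ : Type} [DecidableEq κ] (key : α → κ) (m : κ) :
    ∀ (L : List α) (seen : List κ),
      pvDks key (m :: seen) L = pvDks key seen (L.filter (fun y => key y ≠ m)) := by
  intro L
  induction L with
  | nil => intro seen; rfl
  | cons x xs ih =>
    intro seen
    by_cases hm : key x = m
    · subst hm
      simp [pvDks, ih]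
    · by_cases hx : key x ∈ seen
      · have : key x ∈ (m :: seen) := List.mem_cons_of_mem _ hx
        simp [pvDks, this, hx, hm, ih]
      · have hx' : key x ∉ (m :: seen) := by simp [hx, hm]
        simp only [pvDks, if_neg hx', List.filter_cons]
        simp only [ne_eq, hm, not_false_eq_true, decide_true, if_true, pvDks, if_neg hx]
        refine congrArg _ ?_
        rw [pv_dks_equiv key xs (key x :: m :: seen) (m :: key x :: seen) (by intro v; simp; tauto)]
        exact ih (key x :: seen)

-- the kept representative of class m is the first input element of class m
theorem pv_dks_filter_eq {α κ : Type} [DecidableEq κ] (key : α → κ) (m : κ) :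
    ∀ (L : List α) (seen : List κ), m ∉ seen →
      (pvDks key seen L).filter (fun x => key x = m) = (L.filter (fun x => key x = m)).take 1 := by
  intro L
  induction L with
  | nil => intro seen _; rfl
  | cons x xs ih =>
    intro seen hm
    by_cases hx : key x ∈ seen
    · have hxm : ¬ (key x = m) := fun h => hm (h ▸ hx)
      simp only [pvDks, if_pos hx, List.filter_cons]
      simp only [hxm, decide_false, Bool.false_eq_true, if_false]
      exact ih seen hm
    · by_cases hxm : key x = m
      · subst hxm
        simp only [pvDks, if_neg hx, List.filter_cons, decide_true, if_true, List.take_succ_cons,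
          List.take_zero]
        have : (pvDks key (key x :: seen) xs).filter (fun y => key y = key x) = [] := by
          rw [List.filter_eq_nil_iff]
          intro y hy
          have := pv_key_mem_dks key xs _ y hy
          simp only [List.mem_cons, not_or] at this
          simp [this.1]
        rw [this]
      · simp only [pvDks, if_neg hx, List.filter_cons]
        simp only [hxm, decide_false, Bool.false_eq_true, if_false]
        exact ih (key x :: seen) (by simp [Ne.symm hxm, hm])

-- every nonempty list has a key-minimal element
theorem pv_exists_min {α κ : Type} [LinearOrder κ] (key : α → κ) (l : List α) (h : l ≠ []) :
    ∃ m ∈ l, ∀ v ∈ l, key m ≤ key v := by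
  induction l with
  | nil => simp at h
  | cons a t ih =>
    rcases eq_or_ne t [] with rfl | ht
    · exact ⟨a, by simp⟩
    · obtain ⟨m, hm, hmin⟩ := ih ht
      rcases le_total (key a) (key m) with hle | hle
      · refine ⟨a, by simp, ?_⟩
        intro v hv; rcases List.mem_cons.1 hv with rfl | hv
        · exact le_rfl
        · exact hle.trans (hmin v hv)
      · refine ⟨m, List.mem_cons_of_mem _ hm, ?_⟩
        intro v hv; rcases List.mem_cons.1 hv with rfl | hv
        · exact hle
        · exact hmin v hv

theorem pv_insertBy_pass {α : Type} (before : α → α → Bool) (x : α) (F S : List α)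
    (h : ∀ y ∈ F, before x y = false) :
    PySem.List.insertBy before x (F ++ S) = F ++ PySem.List.insertBy before x S := by
  induction F with
  | nil => simp
  | cons y F' ih =>
    have hy : before x y = false := h y (by simp)
    simp only [List.cons_append, PySem.List.insertBy, hy]
    simp only [ih (fun z hz => h z (by simp [hz])), Bool.false_eq_true, if_false]

theorem pv_insertBy_head {α : Type} (before : α → α → Bool) (x z : α) (zs : List α)
    (h : before x z = true) :
    PySem.List.insertBy before x (z :: zs) = x :: z :: zs := by
  simp [PySem.List.insertBy, h]

theorem pv_sorted_append_singleton {α κ : Type} [LinearOrder κ] (key : α → κ) (L : List α) (x : α) :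
    PySem.List.sorted (L ++ [x]) key =
      PySem.List.insertBy (fun a b => decide (key a < key b)) x (PySem.List.sorted L key) := by
  rw [PySem.List.sorted_eq_foldl_insertBy, PySem.List.sorted_eq_foldl_insertBy, List.foldl_append]
  rfl

-- stable-sort decomposition: the minimal-key class comes first, in input order
theorem pv_sorted_min_split {α κ : Type} [LinearOrder κ] (key : α → κ) : ∀ (L : List α) (m : κ),
    m ∈ L.map key → (∀ y ∈ L, m ≤ key y) →
    PySem.List.sorted L key =
      L.filter (fun x => key x = m) ++ PySem.List.sorted (L.filter (fun x => key x ≠ m)) key := by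
  intro L
  induction L using List.reverseRecOn with
  | nil => intro m hm _; simp at hm
  | append_singleton L x IH =>
    intro m hm hlb
    rcases eq_or_ne L [] with rfl | hL
    · have hmx : key x = m := (by simpa using hm : m = key x).symm
      simp [PySem.List.sorted, PySem.List.insertBy, hmx]
    · rw [pv_sorted_append_singleton]
      by_cases hmem : m ∈ L.map key
      · have hlbL : ∀ y ∈ L, m ≤ key y := fun y hy => hlb y (by simp [hy])
        rw [IH m hmem hlbL]
        by_cases hx : key x = m
        · have hpass : ∀ y ∈ L.filter (fun z => decide (key z = m)),
              (fun a b => decide (key a < key b)) x y = false := by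
            intro y hy
            have hym : key y = m := by simpa using (List.mem_filter.1 hy).2
            simp [hx, hym]
          rw [pv_insertBy_pass _ _ _ _ hpass]
          rcases hS : PySem.List.sorted (L.filter (fun z => key z ≠ m)) key with _ | ⟨z, zs⟩
          · simp only [ne_eq, decide_not] at hS
            simp only [PySem.List.insertBy, List.filter_append, List.filter_cons,
              List.filter_nil, hx, decide_true, if_true, ne_eq, not_true_eq_false,
              decide_false, Bool.false_eq_true, if_false]
            simp [hS]
          · have hzmem : z ∈ L.filter (fun z => key z ≠ m) := by
              have : z ∈ PySem.List.sorted (L.filter (fun z => key z ≠ m)) key := by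
                rw [hS]; exact List.mem_cons_self
              exact (PySem.List.mem_sorted _ _ _ _).1 this
            have hzm : key z ≠ m := by simpa using (List.mem_filter.1 hzmem).2
            have hzL : z ∈ L := (List.mem_filter.1 hzmem).1
            have hlt : m < key z := lt_of_le_of_ne (hlbL z hzL) (Ne.symm hzm)
            rw [pv_insertBy_head _ _ _ _ (by simp [hx]; exact hlt)]
            simp only [ne_eq, decide_not] at hS
            simp only [List.filter_append, List.filter_cons, List.filter_nil, hx,
              decide_true, if_true, ne_eq, not_true_eq_false, decide_false,
              Bool.false_eq_true, if_false, List.append_nil]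
            simp [hS]
        · have hmx : m < key x := lt_of_le_of_ne (hlb x (by simp)) (Ne.symm hx)
          have hpass : ∀ y ∈ L.filter (fun z => decide (key z = m)),
              (fun a b => decide (key a < key b)) x y = false := by
            intro y hy
            have hym : key y = m := by simpa using (List.mem_filter.1 hy).2
            simp [hym, not_lt_of_gt hmx]
          rw [pv_insertBy_pass _ _ _ _ hpass]
          rw [show ((L ++ [x]).filter (fun z => decide (key z = m)))
              = L.filter (fun z => decide (key z = m)) by simp [List.filter_append, hx]]
          rw [show ((L ++ [x]).filter (fun z => decide (key z ≠ m)))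
              = L.filter (fun z => decide (key z ≠ m)) ++ [x] by simp [List.filter_append, hx]]
          rw [pv_sorted_append_singleton]
      · have hmx : key x = m := by
          have : m ∈ L.map key ++ [key x] := by simpa using hm
          rcases List.mem_append.1 this with h | h
          · exact absurd h hmem
          · exact (List.mem_singleton.1 h).symm
        have hgt : ∀ y ∈ L, m < key y := by
          intro y hy
          refine lt_of_le_of_ne (hlb y (by simp [hy])) ?_
          intro h
          exact hmem (h ▸ List.mem_map_of_mem hy)
        rcases hsL : PySem.List.sorted L key with _ | ⟨z, zs⟩
        · exact absurd ((PySem.List.sorted_eq_nil_iff _ _ _).1 hsL) hL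
        · have hzL : z ∈ L := by
            have : z ∈ PySem.List.sorted L key := by rw [hsL]; exact List.mem_cons_self
            exact (PySem.List.mem_sorted _ _ _ _).1 this
          rw [pv_insertBy_head _ _ _ _ (by simp [hmx]; exact hgt z hzL)]
          rw [show ((L ++ [x]).filter (fun z => decide (key z = m))) = [x] by
            simp only [List.filter_append, List.filter_cons, List.filter_nil, hmx, decide_true,
              if_true]
            rw [List.filter_eq_nil_iff.2 (by intro y hy; simp [ne_of_gt (hgt y hy)])]
            rfl]
          rw [show ((L ++ [x]).filter (fun z => decide (key z ≠ m))) = L by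
            simp only [List.filter_append, List.filter_cons, List.filter_nil, hmx, ne_eq,
              not_true_eq_false, decide_false, Bool.false_eq_true, if_false, List.append_nil]
            exact List.filter_eq_self.2 (by intro y hy; simp [ne_of_gt (hgt y hy)])]
          rw [hsL]
          rfl

-- the central fact: consecutive dedup after a stable sort = stable sort after first-occurrence dedup
theorem pv_cd_pass {α κ : Type} [DecidableEq κ] (key : α → κ) (m : κ) (F ys : List α)
    (h : ∀ y ∈ F, key y = m) : pvCd key m (F ++ ys) = pvCd key m ys := by
  induction F with
  | nil => simp
  | cons y F' ih =>
    have := h y (by simp)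
    simp only [List.cons_append, pvCd, this, if_true]
    exact ih (fun z hz => h z (by simp [hz]))

theorem pv_cd_eq_cdedup {α κ : Type} [DecidableEq κ] (key : α → κ) (p : κ) (ys : List α)
    (h : ∀ z ∈ ys.head?, key z ≠ p) : pvCd key p ys = pvCdedup key ys := by
  cases ys with
  | nil => rfl
  | cons z zs =>
    have hz : key z ≠ p := h z (by simp)
    simp [pvCd, pvCdedup, hz]

theorem pv_central {α κ : Type} [LinearOrder κ] (key : α → κ) :
    ∀ (n : ℕ) (L : List α), L.length ≤ n →
      pvCdedup key (PySem.List.sorted L key) = PySem.List.sorted (pvDks key [] L) key := by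
  intro n
  induction n with
  | zero =>
    intro L hL
    have : L = [] := List.length_eq_zero_iff.1 (Nat.le_zero.1 hL)
    subst this; rfl
  | succ n ih =>
    intro L hL
    rcases eq_or_ne L [] with rfl | hne
    · rfl
    · obtain ⟨f, hfL, hfmin⟩ := pv_exists_min key L hne
      have hmem : key f ∈ L.map key := List.mem_map_of_mem hfL
      have hsplit := pv_sorted_min_split key L (key f) hmem hfmin
      have hfF : f ∈ L.filter (fun x => decide (key x = key f)) := List.mem_filter.2 ⟨hfL, by simp⟩
      rcases hF : L.filter (fun x => decide (key x = key f)) with _ | ⟨f0, F'⟩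
      · rw [hF] at hfF; simp at hfF
      · have hf0 : key f0 = key f := by
          have : f0 ∈ L.filter (fun x => decide (key x = key f)) := by
            rw [hF]; exact List.mem_cons_self
          simpa using (List.mem_filter.1 this).2
        have hR : (L.filter (fun x => key x ≠ key f)).length ≤ n := by
          have hlt : (L.filter (fun x => key x ≠ key f)).length < L.length := by
            rw [List.length_filter_lt_length_iff_exists]
            exact ⟨f, hfL, by simp⟩
          omega
        rw [hsplit, hF]
        simp only [List.cons_append, pvCdedup]
        rw [pv_cd_pass key (key f0) F' _ (by
          intro y hy
          have : y ∈ L.filter (fun x => decide (key x = key f)) := by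
            rw [hF]; exact List.mem_cons_of_mem _ hy
          have := (List.mem_filter.1 this).2
          simp only [decide_eq_true_eq] at this
          rw [this, hf0])]
        rw [hf0]
        rw [pv_cd_eq_cdedup key (key f) _ (by
          intro z hz
          have hzs : z ∈ PySem.List.sorted (L.filter (fun x => key x ≠ key f)) key :=
            List.mem_of_mem_head? hz
          have hzR : z ∈ L.filter (fun x => key x ≠ key f) :=
            (PySem.List.mem_sorted _ _ _ _).1 hzs
          simpa using (List.mem_filter.1 hzR).2)]
        rw [ih _ hR]
        have h1 : (pvDks key [] L).filter (fun x => key x = key f) = [f0] := by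
          rw [pv_dks_filter_eq key (key f) L [] (by simp), hF]
          rfl
        have hf0D : f0 ∈ pvDks key [] L := by
          have : f0 ∈ (pvDks key [] L).filter (fun x => key x = key f) := by
            rw [h1]; exact List.mem_cons_self
          exact (List.mem_filter.1 this).1
        have hmemD : key f ∈ (pvDks key [] L).map key := by
          rw [← hf0]; exact List.mem_map_of_mem hf0D
        have hlbD : ∀ y ∈ pvDks key [] L, key f ≤ key y := fun y hy =>
          hfmin y (pv_mem_dks key L [] y hy)
        rw [pv_sorted_min_split key (pvDks key [] L) (key f) hmemD hlbD, h1]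
        rw [pv_dks_filter_ne key (key f) L []]
        rw [pv_dks_cons_seen key (key f) L []]
        rfl

-- A's fold computes first-occurrence dedup of the stripped non-empty names
theorem pv_foldA : ∀ (rh : List (String × String)) (out : List String) (s : PySem.Set String),
    (rh.foldl pvStepA (out, s)).1 =
      out ++ pvDks (fun t => (PySem.Str.lower t).toList) (s.map String.toList) (pvNames rh) := by
  intro rh
  induction rh with
  | nil => intro out s; simp [pvNames, pvDks]
  | cons kv rest ih =>
    intro out s
    simp only [List.foldl_cons]
    by_cases h1 : PySem.Str.strip kv.1 = ""
    · rw [show pvStepA (out, s) kv = (out, s) by simp [pvStepA, h1]]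
      rw [ih out s]
      congr 1
      simp [pvNames, h1]
    · by_cases h2 : PySem.Set.contains s (PySem.Str.lower (PySem.Str.strip kv.1)) = true
      · have hmem2 : PySem.Str.lower (PySem.Str.strip kv.1) ∈ s := by
          unfold PySem.Set.contains at h2
          exact List.mem_of_elem_eq_true h2
        rw [show pvStepA (out, s) kv = (out, s) by simp [pvStepA, h1, hmem2]]
        rw [ih out s]
        congr 1
        have hmem : (PySem.Str.lower (PySem.Str.strip kv.1)).toList ∈ s.map String.toList :=
          List.mem_map_of_mem hmem2
        have hnames : pvNames (kv :: rest) = PySem.Str.strip kv.1 :: pvNames rest := by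
          simp [pvNames, h1]
        rw [hnames]
        simp only [pvDks]
        rw [if_pos hmem]
      · have hnmem : PySem.Str.lower (PySem.Str.strip kv.1) ∉ s := by
          unfold PySem.Set.contains at h2
          exact fun hc => h2 (List.elem_eq_true_of_mem hc)
        rw [show pvStepA (out, s) kv
            = (out ++ [PySem.Str.strip kv.1],
               PySem.Set.add s (PySem.Str.lower (PySem.Str.strip kv.1))) by
          simp [pvStepA, h1, hnmem]]
        rw [ih]
        have hkmem : (PySem.Str.lower (PySem.Str.strip kv.1)).toList ∉ s.map String.toList := by
          intro hc
          obtain ⟨t, ht, hteq⟩ := List.mem_map.1 hc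
          exact hnmem (String.toList_inj.1 hteq ▸ ht)
        have hadd : PySem.Set.add s (PySem.Str.lower (PySem.Str.strip kv.1))
            = s ++ [PySem.Str.lower (PySem.Str.strip kv.1)] := by
          unfold PySem.Set.add
          rw [if_neg h2]
        rw [hadd]
        have hnames : pvNames (kv :: rest) = PySem.Str.strip kv.1 :: pvNames rest := by
          simp [pvNames, h1]
        rw [hnames]
        simp only [pvDks, if_neg hkmem]
        rw [pv_dks_equiv (fun t => (PySem.Str.lower t).toList) (pvNames rest)
          ((s ++ [PySem.Str.lower (PySem.Str.strip kv.1)]).map String.toList)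
          ((PySem.Str.lower (PySem.Str.strip kv.1)).toList :: s.map String.toList)
          (by intro v; simp [or_comm])]
        simp

-- B's fold computes consecutive dedup
theorem pv_foldB : ∀ (ys : List String) (u : List String) (l : String), u.getLast? = some l →
    ys.foldl pvStepB u =
      u ++ pvCd (fun t => (PySem.Str.lower t).toList) ((PySem.Str.lower l).toList) ys := by
  intro ys
  induction ys with
  | nil => intro u l _; simp [pvCd]
  | cons n rest ih =>
    intro u l h
    simp only [List.foldl_cons]
    by_cases he : PySem.Str.lower l = PySem.Str.lower n
    · rw [show pvStepB u n = u by simp [pvStepB, h, he]]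
      rw [ih u l h]
      congr 1
      simp [pvCd, ← he]
    · rw [show pvStepB u n = u ++ [n] by simp [pvStepB, h, he]]
      rw [ih (u ++ [n]) n (by simp)]
      have hne : ¬ ((PySem.Str.lower n).toList = (PySem.Str.lower l).toList) := fun hc =>
        he (String.toList_inj.1 hc).symm
      simp only [pvCd]
      rw [if_neg hne]
      simp

theorem pv_foldB_nil (ys : List String) :
    ys.foldl pvStepB [] = pvCdedup (fun t => (PySem.Str.lower t).toList) ys := by
  cases ys with
  | nil => rfl
  | cons n rest =>
    have h0 : pvStepB [] n = [n] := by simp [pvStepB]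
    simp only [List.foldl_cons, h0]
    rw [pv_foldB rest [n] n (by simp)]
    rfl

-- ===== VERDICT (by name: the statement is the Claim_ definition above) =====
set_option maxHeartbeats 1000000 in
theorem build_preflight_headers_py_spec : Claim_equal_build_preflight_headers_py := by
  intro rh _
  show build_preflight_headers_py rh = build_preflight_headers_py_alt rh
  have hA : (rh.foldl pvStepA ([], PySem.Set.empty)).1
      = pvDks (fun t => (PySem.Str.lower t).toList) [] (pvNames rh) := by
    rw [pv_foldA rh [] PySem.Set.empty]
    simp [PySem.Set.empty]
  show ([("Access-Control-Request-Method", "POST"),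
      ("Access-Control-Request-Headers", PySem.Str.join ", "
        (PySem.List.sorted (rh.foldl pvStepA ([], PySem.Set.empty)).1
          (fun s => (PySem.Str.lower s).toList) false))] : List (String × String))
    = [("Access-Control-Request-Method", "POST"),
       ("Access-Control-Request-Headers", PySem.Str.join ", "
        ((PySem.List.sorted (pvNames rh) (fun s => (PySem.Str.lower s).toList) false).foldl
          pvStepB []))]
  rw [hA, pv_foldB_nil]
  have hdec : (fun (a b : List Char) => a.decidableLT b)
      = (LinearOrder.toDecidableLT : DecidableLT (List Char)) := by
    funext a b; exact Subsingleton.elim _ _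
  rw [hdec]
  have heq : (fun (a b : List Char) => instDecidableEqList a b)
      = (fun (a b : List Char) => LinearOrder.toDecidableEq a b) := by
    funext a b; exact Subsingleton.elim _ _
  rw [heq]
  exact congrArg (fun z => [("Access-Control-Request-Method", "POST"),
      ("Access-Control-Request-Headers", PySem.Str.join ", " z)])
    (pv_central (fun t : String => (PySem.Str.lower t).toList) (pvNames rh).length
      (pvNames rh) le_rfl).symm
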